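-- pv_equiv track=rewrite | github.com/Lander456/ISJ-2025 | project/isj_proj4_xtopint00.py | to_be_credited_alpha
-- ===== SOURCE A (Python) =====
-- def to_be_credited_alpha(lead_actors: list[str],
--                          actors_in_scenes: list[list[str]]
--                         ) -> list[str]:
--     """Returns the list of cast members that need to be credited at the end
--        (are not among lead actors listed first) in alphabetical order.
--
--     >>> to_be_credited_alpha(['Olivier', 'Caine', 'Channing'], [(1, ['Caine', 'Matthews']), (2, ['Olivier', 'Matthews', 'Martin']), (3, ['Morris', 'Caine', 'Cawthorne'])])
--     ['Cawthorne', 'Martin', 'Matthews', 'Morris']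
--     """
--
--     outputList = []
--
--     for scene in actors_in_scenes:
--
--       for actor in scene[1]:
--
--          if actor not in lead_actors and actor not in outputList:
--
--             outputList.append(actor)
--
--     outputList.sort()
--
--     return outputList
-- ===== SOURCE B (Python) =====
-- def _insort_unique(sorted_list, actor):
--     # Splice actor into an (already strictly sorted) list, keeping it sorted
--     # and duplicate-free: scan for the insertion point, then slice-splice.
--     i = 0
--     n = len(sorted_list)
--     while i < n and sorted_list[i] < actor:
--         i += 1
--     if i < n and sorted_list[i] == actor:
--         return sorted_list
--     return sorted_list[:i] + [actor] + sorted_list[i:]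
--
--
-- def to_be_credited_alpha(lead_actors: list[str],
--                          actors_in_scenes: list[list[str]]
--                         ) -> list[str]:
--     # Maintain the credited list sorted and duplicate-free at every step by
--     # ordered insertion; no final sort and no membership-dedup pass needed.
--     credited = []
--     for scene in actors_in_scenes:
--         for actor in scene[1]:
--             if actor not in lead_actors:
--                 credited = _insort_unique(credited, actor)
--     return credited
-- ===== Notes on version B (the rewrite author's own statement) =====
-- stated objective: alternative
-- what changed: B never calls sort: it keeps the credited list strictly sorted and duplicate-free throughout by recursive ordered insertion of each non-lead actor, instead of A's append-with-membership-dedup followed by a final sort.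
import Mathlib
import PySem

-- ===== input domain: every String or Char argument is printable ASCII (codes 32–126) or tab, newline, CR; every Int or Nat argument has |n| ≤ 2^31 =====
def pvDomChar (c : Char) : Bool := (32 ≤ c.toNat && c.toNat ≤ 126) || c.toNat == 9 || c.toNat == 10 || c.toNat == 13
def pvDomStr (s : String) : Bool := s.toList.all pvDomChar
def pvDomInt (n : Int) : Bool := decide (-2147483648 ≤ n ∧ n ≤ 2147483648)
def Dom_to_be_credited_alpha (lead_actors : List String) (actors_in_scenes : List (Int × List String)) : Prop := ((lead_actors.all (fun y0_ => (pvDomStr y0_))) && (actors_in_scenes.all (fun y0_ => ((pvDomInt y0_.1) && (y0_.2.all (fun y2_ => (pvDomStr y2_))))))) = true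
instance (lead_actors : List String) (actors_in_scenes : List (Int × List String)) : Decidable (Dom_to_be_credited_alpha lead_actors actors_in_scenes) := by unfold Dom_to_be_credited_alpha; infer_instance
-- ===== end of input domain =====

-- B never sorts: it keeps the credited list strictly sorted and duplicate-free
-- throughout by recursive ordered insertion (alternative algorithm, no final sort).

-- ===== PORT A =====
def pvDedupStepA (lead_actors : List String) (acc : List String) (actor : String) : List String :=
  if !lead_actors.contains actor && !acc.contains actor then acc ++ [actor] else acc

def to_be_credited_alpha (lead_actors : List String) (actors_in_scenes : List (Int × List String)) : List String :=
  PySem.List.sorted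
    (actors_in_scenes.foldl
      (fun outputList scene => scene.2.foldl (pvDedupStepA lead_actors) outputList) [])
    (fun x => x) false

-- ===== PORT B =====
-- Source B's _insort_unique: scan for the insertion point (the while loop), then
-- slice-splice (sorted_list[:i] + [actor] + sorted_list[i:])
def pvScanLt (sorted_list : List String) (actor : String) : Nat :=
  match sorted_list with
  | [] => 0
  | h :: t => if h < actor then pvScanLt t actor + 1 else 0

def pvInsortUnique (sorted_list : List String) (actor : String) : List String :=
  let i := pvScanLt sorted_list actor
  if sorted_list[i]? = some actor then sorted_list
  else sorted_list.take i ++ [actor] ++ sorted_list.drop i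

def to_be_credited_alpha_alt (lead_actors : List String) (actors_in_scenes : List (Int × List String)) : List String :=
  actors_in_scenes.foldl
    (fun credited scene =>
      scene.2.foldl
        (fun credited actor =>
          if !lead_actors.contains actor then pvInsortUnique credited actor else credited)
        credited)
    []

-- ===== PRECONDITION & SPEC =====
def Spec_to_be_credited_alpha (lead_actors : List String) (actors_in_scenes : List (Int × List String)) (out : List String) : Prop := out = to_be_credited_alpha_alt lead_actors actors_in_scenes
instance (lead_actors : List String) (actors_in_scenes : List (Int × List String)) (out : List String) : Decidable (Spec_to_be_credited_alpha lead_actors actors_in_scenes out) := by unfold Spec_to_be_credited_alpha; infer_instance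

-- ===== CLAIM =====
def Claim_equal_to_be_credited_alpha : Prop := ∀ (lead_actors : List String) (actors_in_scenes : List (Int × List String)), Dom_to_be_credited_alpha lead_actors actors_in_scenes → Spec_to_be_credited_alpha lead_actors actors_in_scenes (to_be_credited_alpha lead_actors actors_in_scenes)

-- ===== LEMMAS AND PROOFS =====

-- collapse either nested scene/actor fold into one fold over the flattened actor list
theorem pv_nested_flat (f : List String → String → List String)
    (scenes : List (Int × List String)) : ∀ (init : List String),
    scenes.foldl (fun acc scene => scene.2.foldl f acc) init
      = (scenes.flatMap (fun s => s.2)).foldl f init := by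
  induction scenes with
  | nil => intro init; rfl
  | cons s rest ih =>
    intro init
    rw [List.foldl_cons, ih, List.flatMap_cons, List.foldl_append]

-- ordered-dedup step (A's step on a list already filtered of leads)
def pvDedupStepD (acc : List String) (actor : String) : List String :=
  if !acc.contains actor then acc ++ [actor] else acc

theorem pvStepA_filter (lead_actors : List String) (xs : List String) : ∀ (acc : List String),
    xs.foldl (pvDedupStepA lead_actors) acc
      = (xs.filter (fun a => !lead_actors.contains a)).foldl pvDedupStepD acc := by
  induction xs with
  | nil => intro acc; rfl
  | cons a t ih =>
    intro acc
    by_cases hl : a ∈ lead_actors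
    · have : pvDedupStepA lead_actors acc a = acc := by simp [pvDedupStepA, hl]
      rw [List.foldl_cons, this, List.filter_cons_of_neg (by simp [hl]), ih]
    · have : pvDedupStepA lead_actors acc a = pvDedupStepD acc a := by
        by_cases hm : a ∈ acc <;> simp [pvDedupStepA, pvDedupStepD, hl, hm]
      rw [List.foldl_cons, this, List.filter_cons_of_pos (by simp [hl]), List.foldl_cons, ih]

theorem pvDedup_sound (xs : List String) : ∀ (acc : List String), acc.Nodup →
    ((xs.foldl pvDedupStepD acc).Nodup ∧ ∀ x, x ∈ xs.foldl pvDedupStepD acc ↔ x ∈ acc ∨ x ∈ xs) := by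
  induction xs with
  | nil => intro acc h; simpa using h
  | cons a t ih =>
    intro acc hacc
    by_cases ha : a ∈ acc
    · have hstep : pvDedupStepD acc a = acc := by simp [pvDedupStepD, ha]
      have h := ih acc hacc
      rw [List.foldl_cons, hstep]
      refine ⟨h.1, ?_⟩
      intro x
      have := h.2 x
      simp at this ⊢
      constructor
      · intro hx; tauto
      · rintro (hx | rfl | hx) <;> [exact this.mpr (Or.inl hx); exact this.mpr (Or.inl ha); exact this.mpr (Or.inr hx)]
    · have hstep : pvDedupStepD acc a = acc ++ [a] := by simp [pvDedupStepD, ha]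
      have hnd : (acc ++ [a]).Nodup :=
        List.Nodup.append hacc (List.nodup_singleton a) (List.disjoint_singleton.mpr ha)
      have h := ih (acc ++ [a]) hnd
      rw [List.foldl_cons, hstep]
      refine ⟨h.1, ?_⟩
      intro x
      have := h.2 x
      simp at this ⊢
      tauto

-- proof helper: structural-recursion form of the same ordered insertion
def pvInsortRec (l : List String) (a : String) : List String :=
  match l with
  | [] => [a]
  | h :: t =>
    if a < h then a :: h :: t
    else if a = h then h :: t
    else h :: pvInsortRec t a

theorem pvInsort_eq_rec (l : List String) (a : String) :
    pvInsortUnique l a = pvInsortRec l a := by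
  induction l with
  | nil => rfl
  | cons h t ih =>
    by_cases h1 : a < h
    · have hs : pvScanLt (h :: t) a = 0 := by simp [pvScanLt, not_lt.mpr (le_of_lt h1)]
      have hne : h ≠ a := fun e => absurd h1 (by simp [e])
      simp [pvInsortUnique, pvInsortRec, hs, h1, hne]
    · by_cases h2 : a = h
      · subst h2
        have hs : pvScanLt (a :: t) a = 0 := by simp [pvScanLt]
        simp [pvInsortUnique, pvInsortRec, hs]
      · have hha : h < a := lt_of_le_of_ne (le_of_not_gt h1) (fun e => h2 e.symm)
        have hs : pvScanLt (h :: t) a = pvScanLt t a + 1 := by simp [pvScanLt, hha]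
        by_cases hc : t[pvScanLt t a]? = some a
        · simp [pvInsortUnique, pvInsortRec, hs, hc, h1, h2, ← ih]
        · simp [pvInsortUnique, pvInsortRec, hs, hc, h1, h2, ← ih]

theorem pvInsortRec_mem (l : List String) (a x : String) :
    x ∈ pvInsortRec l a ↔ x = a ∨ x ∈ l := by
  induction l with
  | nil => simp [pvInsortRec]
  | cons h t ih =>
    by_cases h1 : a < h
    · simp [pvInsortRec, h1]
    · by_cases h2 : a = h
      · subst h2; simp [pvInsortRec]
      · simp [pvInsortRec, h1, h2, ih]; tauto

theorem pvInsort_mem (l : List String) (a x : String) :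
    x ∈ pvInsortUnique l a ↔ x = a ∨ x ∈ l := by
  rw [pvInsort_eq_rec]; exact pvInsortRec_mem l a x

theorem pvInsort_sorted (l : List String) (a : String) (hs : l.Pairwise (· < ·)) :
    (pvInsortUnique l a).Pairwise (· < ·) := by
  rw [pvInsort_eq_rec]
  induction l with
  | nil => simp [pvInsortRec]
  | cons h t ih =>
    have hht : ∀ y ∈ t, h < y := (List.pairwise_cons.mp hs).1
    have hts : t.Pairwise (· < ·) := (List.pairwise_cons.mp hs).2
    by_cases h1 : a < h
    · simp only [pvInsortRec, if_pos h1]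
      refine List.pairwise_cons.mpr ⟨?_, hs⟩
      intro y hy
      rcases List.mem_cons.mp hy with rfl | hy
      · exact h1
      · exact lt_trans h1 (hht y hy)
    · by_cases h2 : a = h
      · simpa [pvInsortRec, h1, h2] using hs
      · have hha : h < a := lt_of_le_of_ne (le_of_not_gt h1) (fun e => h2 e.symm)
        simp only [pvInsortRec, if_neg h1, if_neg h2]
        refine List.pairwise_cons.mpr ⟨?_, ih hts⟩
        intro y hy
        rcases (pvInsortRec_mem t a y).mp hy with rfl | hy
        · exact hha
        · exact hht y hy

-- invariant of B's fold: acc strictly sorted stays strictly sorted; members accumulate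
theorem pvBfold_sound (lead_actors : List String) (xs : List String) :
    ∀ (acc : List String), acc.Pairwise (· < ·) →
    ((xs.foldl (fun credited actor =>
        if !lead_actors.contains actor then pvInsortUnique credited actor else credited) acc).Pairwise (· < ·)
     ∧ ∀ x, x ∈ xs.foldl (fun credited actor =>
        if !lead_actors.contains actor then pvInsortUnique credited actor else credited) acc
        ↔ x ∈ acc ∨ x ∈ xs.filter (fun a => !lead_actors.contains a)) := by
  induction xs with
  | nil => intro acc h; simpa using h
  | cons a t ih =>
    intro acc hacc
    by_cases hl : a ∈ lead_actors
    · have hstep : (if !lead_actors.contains a then pvInsortUnique acc a else acc) = acc := by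
        simp [hl]
      rw [List.foldl_cons, hstep, List.filter_cons_of_neg (by simp [hl])]
      exact ih acc hacc
    · have hstep : (if !lead_actors.contains a then pvInsortUnique acc a else acc)
          = pvInsortUnique acc a := by simp [hl]
      rw [List.foldl_cons, hstep, List.filter_cons_of_pos (by simp [hl])]
      have h := ih (pvInsortUnique acc a) (pvInsort_sorted acc a hacc)
      refine ⟨h.1, ?_⟩
      intro x
      rw [h.2 x, pvInsort_mem]
      simp only [List.mem_filter, List.mem_cons]
      tauto

-- ===== VERDICT =====
theorem to_be_credited_alpha_spec : Claim_equal_to_be_credited_alpha := by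
  intro lead_actors scenes _
  unfold Spec_to_be_credited_alpha to_be_credited_alpha to_be_credited_alpha_alt
  rw [pv_nested_flat, pv_nested_flat, pvStepA_filter]
  set pool := (scenes.flatMap (fun s => s.2)) with hpool
  have hA := pvDedup_sound (pool.filter (fun a => !lead_actors.contains a)) [] (by simp)
  have hB := pvBfold_sound lead_actors pool [] (by simp)
  set d := (pool.filter (fun a => !lead_actors.contains a)).foldl pvDedupStepD [] with hd
  set b := pool.foldl (fun credited actor =>
      if !lead_actors.contains actor then pvInsortUnique credited actor else credited) [] with hb
  have hbnd : b.Nodup := hB.1.imp (fun h => ne_of_lt h)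
  have hperm : b.Perm d := by
    refine (List.perm_ext_iff_of_nodup hbnd hA.1).mpr ?_
    intro x
    rw [hB.2 x, hA.2 x]
  exact (PySem.List.sorted_eq_of_perm_of_pairwise_lt d b (fun x => x) hperm hB.1)
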